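-- pv_equiv track=rewrite | github.com/alirezanaserinia/AI-CA2 | main.py | is_selctions_safe
-- ===== SOURCE A (Python) =====
-- def is_selctions_safe(selections):
-- 	if len(selections) < 3:
-- 		return True
-- 	selections.sort()
-- 	for i in range(len(selections) - 2):
-- 		for j in range(i + 1, len(selections) - 1):
-- 			for k in range(j + 1, len(selections)):
-- 				if selections[i][0] == selections[j][0] and selections[i][1] == selections[k][0] and selections[j][1] == selections[k][1]:
-- 					return False
-- 	return True
-- ===== SOURCE B (Python) =====
-- def is_selctions_safe(selections):
--     if len(selections) < 3:
--         return True
--     selections.sort()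
--     last = {}
--     for idx, pair in enumerate(selections):
--         last[pair] = idx
--     n = len(selections)
--     for q in range(1, n):
--         a, c = selections[q]
--         for p in range(q):
--             if selections[p][0] == a and last.get((selections[p][1], c), -1) > q:
--                 return False
--     return True
-- ===== Notes on version B (the rewrite author's own statement) =====
-- stated objective: faster
-- what changed: The O(n^3) triple nested scan is replaced by a hash index: one pass records the last sorted position of every pair, then a double loop over same-first-coordinate pairs checks in O(1) whether the required third pair occurs later, eliminating the innermost scan.
import Mathlib
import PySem

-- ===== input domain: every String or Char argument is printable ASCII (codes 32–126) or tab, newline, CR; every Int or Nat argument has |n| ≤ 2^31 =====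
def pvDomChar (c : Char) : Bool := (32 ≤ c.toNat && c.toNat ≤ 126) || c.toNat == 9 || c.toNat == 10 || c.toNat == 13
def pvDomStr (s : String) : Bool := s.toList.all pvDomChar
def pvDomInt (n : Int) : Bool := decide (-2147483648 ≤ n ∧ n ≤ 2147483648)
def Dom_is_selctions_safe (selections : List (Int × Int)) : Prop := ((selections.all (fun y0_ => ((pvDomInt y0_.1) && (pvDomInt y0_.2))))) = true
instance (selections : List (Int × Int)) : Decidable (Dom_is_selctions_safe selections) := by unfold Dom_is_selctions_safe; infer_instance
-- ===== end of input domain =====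

-- B replaces A's O(n^3) triple scan by a last-position hash index over the sorted list (pairs + O(1) lookup).
-- Both Pythons sort `selections` in place (when len ≥ 3); the equivalence proved here is about the return value.

-- ===== PORT A =====
def is_selctions_safe (selections : List (Int × Int)) : Bool :=
  if PySem.List.len selections < 3 then true
  else
    if (PySem.List.pyRange 0 (PySem.List.len (PySem.List.sorted2 selections (fun x => x.1) (fun x => x.2)) - 2) 1).any (fun i =>
         (PySem.List.pyRange (i + 1) (PySem.List.len (PySem.List.sorted2 selections (fun x => x.1) (fun x => x.2)) - 1) 1).any (fun j =>
           (PySem.List.pyRange (j + 1) (PySem.List.len (PySem.List.sorted2 selections (fun x => x.1) (fun x => x.2))) 1).any (fun k =>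
             (PySem.List.pyGetD (PySem.List.sorted2 selections (fun x => x.1) (fun x => x.2)) i (0, 0)).1 == (PySem.List.pyGetD (PySem.List.sorted2 selections (fun x => x.1) (fun x => x.2)) j (0, 0)).1
             && (PySem.List.pyGetD (PySem.List.sorted2 selections (fun x => x.1) (fun x => x.2)) i (0, 0)).2 == (PySem.List.pyGetD (PySem.List.sorted2 selections (fun x => x.1) (fun x => x.2)) k (0, 0)).1
             && (PySem.List.pyGetD (PySem.List.sorted2 selections (fun x => x.1) (fun x => x.2)) j (0, 0)).2 == (PySem.List.pyGetD (PySem.List.sorted2 selections (fun x => x.1) (fun x => x.2)) k (0, 0)).2)))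
    then false else true

-- ===== PORT B =====
def is_selctions_safe_alt (selections : List (Int × Int)) : Bool :=
  if PySem.List.len selections < 3 then true
  else
    if (PySem.List.pyRange 1 (PySem.List.len (PySem.List.sorted2 selections (fun x => x.1) (fun x => x.2))) 1).any (fun q =>
         (PySem.List.pyRange 0 q 1).any (fun p =>
           (PySem.List.pyGetD (PySem.List.sorted2 selections (fun x => x.1) (fun x => x.2)) p (0, 0)).1 == (PySem.List.pyGetD (PySem.List.sorted2 selections (fun x => x.1) (fun x => x.2)) q (0, 0)).1
           && decide (((PySem.List.enumerate (PySem.List.sorted2 selections (fun x => x.1) (fun x => x.2)) 0).foldl (fun d p => d.insert p.2 p.1) PySem.Dict.empty).getD ((PySem.List.pyGetD (PySem.List.sorted2 selections (fun x => x.1) (fun x => x.2)) p (0, 0)).2, (PySem.List.pyGetD (PySem.List.sorted2 selections (fun x => x.1) (fun x => x.2)) q (0, 0)).2) (-1) > q)))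
    then false else true

-- ===== PRECONDITION & SPEC =====
def Spec_is_selctions_safe (selections : List (Int × Int)) (out : Bool) : Prop := out = is_selctions_safe_alt selections
instance (selections : List (Int × Int)) (out : Bool) : Decidable (Spec_is_selctions_safe selections out) := by unfold Spec_is_selctions_safe; infer_instance

-- ===== CLAIM (what is proved, stated in full; the proofs are below) =====
def Claim_equal_is_selctions_safe : Prop := ∀ (selections : List (Int × Int)), Dom_is_selctions_safe selections → Spec_is_selctions_safe selections (is_selctions_safe selections)

-- ===== LEMMAS AND PROOFS =====

-- B's last-occurrence dict: its lookup exceeds q exactly when the value occurs at some position after q.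
theorem lastIdx_getD_gt_iff (S : List (Int × Int)) (v : Int × Int) (q : Int) (hq : 0 ≤ q) :
    ((PySem.List.enumerate S 0).foldl (fun d p => d.insert p.2 p.1) PySem.Dict.empty).getD v (-1) > q
    ↔ ∃ k : Nat, q < (k : Int) ∧ ∃ h : k < S.length, S[k] = v := by
  induction S using List.reverseRecOn with
  | nil =>
    simp [PySem.List.enumerate_nil, PySem.Dict.getD_empty]
    omega
  | append_singleton S x ih =>
    rw [PySem.List.enumerate_append, List.foldl_append]
    simp only [PySem.List.enumerate_cons, PySem.List.enumerate_nil, List.foldl_cons, List.foldl_nil]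
    rw [PySem.Dict.getD_insert]
    by_cases hvx : v = x
    · subst hvx
      rw [if_pos rfl]
      constructor
      · intro h
        exact ⟨S.length, by omega, by simp, by simp⟩
      · intro ⟨k, hk, hlt, _⟩
        simp at hlt
        omega
    · rw [if_neg hvx, ih]
      constructor
      · intro ⟨k, hk, hlt, he⟩
        exact ⟨k, hk, by simp; omega, by rw [List.getElem_append_left hlt]; exact he⟩
      · intro ⟨k, hk, hlt, he⟩
        have hlt' : k < S.length := by
          rcases Nat.lt_or_ge k S.length with h | h
          · exact h
          · exfalso
            have hks : k = S.length := by simp at hlt; omega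
            subst hks
            rw [List.getElem_append_right (by omega)] at he
            simp at he
            exact hvx he.symm
        exact ⟨k, hk, hlt', by rw [List.getElem_append_left hlt'] at he; exact he⟩

theorem is_selctions_safe_spec_aux : ∀ (selections : List (Int × Int)),
    is_selctions_safe selections = is_selctions_safe_alt selections := by
  intro sel
  unfold is_selctions_safe is_selctions_safe_alt
  by_cases h3 : PySem.List.len sel < 3
  · rw [if_pos h3, if_pos h3]
  · rw [if_neg h3, if_neg h3]
    set s := PySem.List.sorted2 sel (fun x => x.1) (fun x => x.2) with hs
    have hcond :
        ((PySem.List.pyRange 0 (PySem.List.len s - 2) 1).any (fun i =>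
           (PySem.List.pyRange (i + 1) (PySem.List.len s - 1) 1).any (fun j =>
             (PySem.List.pyRange (j + 1) (PySem.List.len s) 1).any (fun k =>
               (PySem.List.pyGetD s i (0, 0)).1 == (PySem.List.pyGetD s j (0, 0)).1
               && (PySem.List.pyGetD s i (0, 0)).2 == (PySem.List.pyGetD s k (0, 0)).1
               && (PySem.List.pyGetD s j (0, 0)).2 == (PySem.List.pyGetD s k (0, 0)).2))))
        = ((PySem.List.pyRange 1 (PySem.List.len s) 1).any (fun q =>
             (PySem.List.pyRange 0 q 1).any (fun p =>
               (PySem.List.pyGetD s p (0, 0)).1 == (PySem.List.pyGetD s q (0, 0)).1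
               && decide (((PySem.List.enumerate s 0).foldl (fun d p => d.insert p.2 p.1) PySem.Dict.empty).getD ((PySem.List.pyGetD s p (0, 0)).2, (PySem.List.pyGetD s q (0, 0)).2) (-1) > q)))) := by
      rw [Bool.eq_iff_iff]
      simp only [List.any_eq_true, PySem.List.mem_pyRange_one, Bool.and_eq_true, beq_iff_eq,
        decide_eq_true_eq, PySem.List.len_eq]
      constructor
      · rintro ⟨i, ⟨hi0, hi2⟩, j, ⟨hj1, hj2⟩, k, ⟨hk1, hk2⟩, ⟨h1, h2⟩, h4⟩
        refine ⟨j, ⟨by omega, by omega⟩, i, ⟨by omega, by omega⟩, h1, ?_⟩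
        rw [lastIdx_getD_gt_iff _ _ _ (by omega)]
        refine ⟨k.toNat, by omega, by omega, ?_⟩
        have ek := PySem.List.pyGetD_eq_getElem (xs := s) (i := k) (d := ((0 : Int), (0 : Int)))
          (by omega) (by exact_mod_cast hk2)
        rw [ek] at h2 h4
        rw [h2, h4]
      · rintro ⟨q, ⟨hq1, hq2⟩, p, ⟨hp0, hp2⟩, h1, hgt⟩
        rw [lastIdx_getD_gt_iff _ _ _ (by omega)] at hgt
        obtain ⟨k, hk, hklt, heq⟩ := hgt
        have hkl : k < s.length := hklt
        have ek : PySem.List.pyGetD s ((k : Nat) : Int) ((0 : Int), (0 : Int))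
            = ((PySem.List.pyGetD s p (0, 0)).2, (PySem.List.pyGetD s q (0, 0)).2) := by
          have e := PySem.List.pyGetD_eq_getElem (xs := s) (i := ((k : Nat) : Int))
            (d := ((0 : Int), (0 : Int))) (by omega) (by exact_mod_cast hkl)
          rw [e]
          simpa using heq
        exact ⟨p, ⟨by omega, by omega⟩, q, ⟨by omega, by omega⟩, (k : Int), ⟨by omega, by omega⟩,
          ⟨h1, by rw [ek]⟩, by rw [ek]⟩
    rw [hcond]

-- ===== VERDICT (by name: the statement is the Claim_ definition above) =====
theorem is_selctions_safe_spec : Claim_equal_is_selctions_safe := by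
  intro sel _
  unfold Spec_is_selctions_safe
  exact is_selctions_safe_spec_aux sel
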